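-- pv_equiv track=rewrite | github.com/julesBR49/TensorGym_Site | tensorgym_site/Tensors/Equation.py | inBrackets
-- ===== SOURCE A (Python) =====
-- def inBrackets(strx):
--     while strx.startswith(" "):
--         strx = strx[1: len(strx)]
--     while strx.endswith(" "):
--         strx = strx[0: len(strx)-1]
--     if strx.startswith("\\(") and strx.endswith("\\)"):
--         return True
--     else:
--         return False
-- ===== SOURCE B (Python) =====
-- def inBrackets(strx):
--     # Two-pointer scan: move index bounds past the spaces in place, then test
--     # the four bracket characters directly -- no slice copies are ever made.
--     i, j = 0, len(strx) - 1
--     while i <= j and strx[i] == " ":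
--         i += 1
--     while j >= i and strx[j] == " ":
--         j -= 1
--     return (j - i >= 3 and strx[i] == "\\" and strx[i + 1] == "("
--             and strx[j - 1] == "\\" and strx[j] == ")")
-- ===== Notes on version B (the rewrite author's own statement) =====
-- stated objective: faster
-- what changed: Replaces A's two while-loops that repeatedly rebuild the string by slicing (one fresh copy per stripped space) and its prefix/suffix string tests with a two-pointer index scan that moves i and j past the spaces in place and then compares the four bracket characters directly, allocating nothing.
import Mathlib
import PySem

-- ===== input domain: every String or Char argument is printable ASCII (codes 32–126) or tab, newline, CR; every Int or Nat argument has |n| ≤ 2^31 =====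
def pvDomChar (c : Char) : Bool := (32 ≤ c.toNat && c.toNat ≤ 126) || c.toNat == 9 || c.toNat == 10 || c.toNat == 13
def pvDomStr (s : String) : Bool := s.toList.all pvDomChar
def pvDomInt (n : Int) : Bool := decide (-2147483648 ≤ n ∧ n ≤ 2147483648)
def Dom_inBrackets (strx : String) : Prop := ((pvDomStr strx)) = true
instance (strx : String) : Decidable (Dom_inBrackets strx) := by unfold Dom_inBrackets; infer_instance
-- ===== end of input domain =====

-- B replaces A's repeated slice-copying while-loops by an in-place two-pointer
-- index scan plus four direct character tests (alternative decomposition; return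
-- value equivalence only — neither program mutates observable state).

-- ===== PORT A =====
-- while strx.startswith(" "): strx = strx[1: len(strx)]
def pvAStripL (s : List Char) : List Char :=
  if PySem.Chars.startswith s [' '] then
    pvAStripL (PySem.Chars.slice s (some 1) (some (s.length : Int)))
  else s
termination_by s.length
decreasing_by
  rename_i h
  have hne : s ≠ [] := by
    intro he; subst he; simp [PySem.Chars.startswith_iff] at h
  have : (PySem.Chars.slice s (some 1) (some (s.length : Int))).length ≤ s.length - 1 := by
    simp only [PySem.Chars.slice_eq_listSlice,
      PySem.List.slice_toNat s (by omega : (0:Int) ≤ 1) (by omega : (0:Int) ≤ (s.length:Int)),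
      List.length_take, List.length_drop]
    omega
  have hlen : 0 < s.length := List.length_pos_iff.mpr hne
  omega

-- while strx.endswith(" "): strx = strx[0: len(strx)-1]
def pvAStripR (s : List Char) : List Char :=
  if PySem.Chars.endswith s [' '] then
    pvAStripR (PySem.Chars.slice s (some 0) (some ((s.length : Int) - 1)))
  else s
termination_by s.length
decreasing_by
  rename_i h
  have hne : s ≠ [] := by
    intro he; subst he; simp [PySem.Chars.endswith_iff] at h
  have hlen : 0 < s.length := List.length_pos_iff.mpr hne
  have : (PySem.Chars.slice s (some 0) (some ((s.length : Int) - 1))).length ≤ s.length - 1 := by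
    simp only [PySem.Chars.slice_eq_listSlice,
      PySem.List.slice_toNat s (by omega : (0:Int) ≤ 0)
        (by omega : (0:Int) ≤ (s.length:Int) - 1),
      List.length_take, List.length_drop]
    omega
  omega

def inBrackets (strx : String) : Bool :=
  let s := pvAStripR (pvAStripL strx.toList)
  if PySem.Chars.startswith s ['\\', '('] && PySem.Chars.endswith s ['\\', ')'] then
    true
  else
    false

-- ===== PORT B =====
-- while i <= j and strx[i] == " ": i += 1
def pvBSkipL (s : List Char) (i j : Int) : Int :=
  if i ≤ j ∧ PySem.List.pyGet? s i = some ' ' then pvBSkipL s (i + 1) j else i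
termination_by (j + 1 - i).toNat
decreasing_by rename_i h; omega

-- while j >= i and strx[j] == " ": j -= 1
def pvBSkipR (s : List Char) (i j : Int) : Int :=
  if i ≤ j ∧ PySem.List.pyGet? s j = some ' ' then pvBSkipR s i (j - 1) else j
termination_by (j + 1 - i).toNat
decreasing_by rename_i h; omega

def inBrackets_alt (strx : String) : Bool :=
  let s := strx.toList
  let i := pvBSkipL s 0 ((s.length : Int) - 1)
  let j := pvBSkipR s i ((s.length : Int) - 1)
  decide (3 ≤ j - i) && (PySem.List.pyGet? s i == some '\\')
    && (PySem.List.pyGet? s (i + 1) == some '(')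
    && (PySem.List.pyGet? s (j - 1) == some '\\')
    && (PySem.List.pyGet? s j == some ')')

-- ===== PRECONDITION & SPEC =====
def Spec_inBrackets (strx : String) (out : Bool) : Prop := out = inBrackets_alt strx
instance (strx : String) (out : Bool) : Decidable (Spec_inBrackets strx out) := by unfold Spec_inBrackets; infer_instance

-- ===== CLAIM (what is proved, stated in full; the proofs are below) =====
def Claim_equal_inBrackets : Prop := ∀ (strx : String), Dom_inBrackets strx → Spec_inBrackets strx (inBrackets strx)

-- ===== LEMMAS AND PROOFS =====

-- A's left-strip loop is dropWhile (spaces only).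
lemma pvAStripL_eq (s : List Char) : pvAStripL s = s.dropWhile (fun c => c == ' ') := by
  induction s with
  | nil => rw [pvAStripL]; simp [PySem.Chars.startswith_iff]
  | cons a t ih =>
    rw [pvAStripL]
    by_cases ha : a = ' '
    · subst ha
      have hpre : PySem.Chars.startswith (' ' :: t) [' '] = true := by
        rw [PySem.Chars.startswith_iff]; exact ⟨t, rfl⟩
      have hsl : PySem.Chars.slice (' ' :: t) (some 1) (some ((' ' :: t).length : Int)) = t := by
        rw [PySem.Chars.slice_eq_listSlice,
          PySem.List.slice_toNat _ (by omega : (0:Int) ≤ 1)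
            (by omega : (0:Int) ≤ ((' ' :: t).length : Int))]
        simp
      rw [hpre, if_pos rfl, hsl, ih]
      simp [List.dropWhile_cons]
    · have hpre : PySem.Chars.startswith (a :: t) [' '] = false := by
        rw [Bool.eq_false_iff]
        intro h
        rw [PySem.Chars.startswith_iff] at h
        rcases h with ⟨u, hu⟩
        simp at hu
        exact ha hu.1.symm
      rw [hpre]
      simp [List.dropWhile_cons, ha]

-- A's right-strip loop is dropWhile on the reverse.
lemma pvAStripR_eq (s : List Char) :
    pvAStripR s = (s.reverse.dropWhile (fun c => c == ' ')).reverse := by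
  induction s using List.reverseRecOn with
  | nil => rw [pvAStripR]; simp [PySem.Chars.endswith_iff]
  | append_singleton t a ih =>
    rw [pvAStripR]
    by_cases ha : a = ' '
    · subst ha
      have hend : PySem.Chars.endswith (t ++ [' ']) [' '] = true := by
        rw [PySem.Chars.endswith_iff]; exact ⟨t, rfl⟩
      have hsl : PySem.Chars.slice (t ++ [' ']) (some 0)
          (some (((t ++ [' ']).length : Int) - 1)) = t := by
        rw [PySem.Chars.slice_eq_listSlice,
          PySem.List.slice_toNat _ (by omega : (0:Int) ≤ 0)
            (by simp : (0:Int) ≤ ((t ++ [' ']).length : Int) - 1)]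
        have : (((t ++ [' ']).length : Int) - 1).toNat = t.length := by simp
        simp [this]
      rw [hend, if_pos rfl, hsl, ih]
      simp [List.dropWhile_cons]
    · have hend : PySem.Chars.endswith (t ++ [a]) [' '] = false := by
        rw [Bool.eq_false_iff]
        intro h
        rw [PySem.Chars.endswith_iff] at h
        rcases h with ⟨u, hu⟩
        have := congrArg (fun l => l.getLast?) hu
        simp at this
        exact ha this.symm
      rw [hend]
      simp [List.dropWhile_cons, ha]

-- B's left loop lands on index (leading-space count), counted from k.
lemma pvBSkipL_spec (s : List Char) :
    ∀ n k, s.length - k ≤ n →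
      pvBSkipL s (k : Int) ((s.length : Int) - 1) =
        (k : Int) + (((s.drop k).takeWhile (fun c => c == ' ')).length : Int) := by
  intro n
  induction n with
  | zero =>
    intro k hk
    have hk' : s.length ≤ k := by omega
    rw [pvBSkipL]
    rw [if_neg]
    · simp [List.drop_eq_nil_of_le hk']
    · rintro ⟨h1, _⟩; omega
  | succ n ih =>
    intro k hk
    by_cases hlt : k < s.length
    · have hget : PySem.List.pyGet? s (k : Int) = some s[k] := by
        rw [PySem.List.pyGet?_natCast]
        simp [List.getElem?_eq_getElem hlt]
      have hdrop : s.drop k = s[k] :: s.drop (k + 1) := List.drop_eq_getElem_cons hlt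
      by_cases hsp : s[k] = ' '
      · rw [pvBSkipL, if_pos ⟨by omega, by rw [hget, hsp]⟩]
        have : ((k : Int) + 1) = ((k + 1 : Nat) : Int) := by push_cast; ring
        rw [this, ih (k + 1) (by omega)]
        rw [hdrop]
        simp [List.takeWhile_cons, hsp]
        push_cast; ring
      · rw [pvBSkipL, if_neg]
        · rw [hdrop]
          simp [List.takeWhile_cons, hsp]
        · rintro ⟨_, h2⟩
          rw [hget] at h2
          exact hsp (Option.some.injEq _ _ ▸ h2)
    · rw [pvBSkipL, if_neg]
      · simp [List.drop_eq_nil_of_le (by omega : s.length ≤ k)]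
      · rintro ⟨h1, _⟩; omega

-- B's right loop lands on c + (right-trimmed length of s[c:m]) - 1.
lemma pvBSkipR_spec (s : List Char) (c : Nat) :
    ∀ n m, c ≤ m → m ≤ s.length → m - c ≤ n →
      pvBSkipR s (c : Int) ((m : Int) - 1) =
        (c : Int) + ((((s.take m).drop c).reverse.dropWhile (fun c => c == ' ')).length : Int) - 1 := by
  intro n
  induction n with
  | zero =>
    intro m h1 h2 h3
    have : m = c := by omega
    subst this
    rw [pvBSkipR]
    simp [List.drop_eq_nil_of_le (by simp : (s.take m).length ≤ m)]
  | succ n ih =>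
    intro m h1 h2 h3
    by_cases hmc : m = c
    · subst hmc
      rw [pvBSkipR, if_neg]
      · simp [List.drop_eq_nil_of_le (by simp [min_le_right] : (s.take m).length ≤ m)]
      · rintro ⟨hc, _⟩; omega
    · obtain ⟨k, rfl⟩ : ∃ k, m = k + 1 := ⟨m - 1, by omega⟩
      have hm : c ≤ k := by omega
      have hm1 : k < s.length := by omega
      have hget : PySem.List.pyGet? s (((k + 1 : Nat) : Int) - 1) = some s[k] := by
        have : (((k + 1 : Nat) : Int) - 1) = ((k : Nat) : Int) := by push_cast; ring
        rw [this, PySem.List.pyGet?_natCast]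
        simp [List.getElem?_eq_getElem hm1]
      have hseg : (s.take (k + 1)).drop c = (s.take k).drop c ++ [s[k]] := by
        rw [List.take_succ, List.getElem?_eq_getElem hm1]
        simp only [Option.toList_some]
        rw [List.drop_append_of_le_length (by simp; omega)]
      by_cases hsp : s[k] = ' '
      · rw [pvBSkipR, if_pos ⟨by omega, by rw [hget, hsp]⟩]
        have : (((k + 1 : Nat) : Int) - 1 - 1) = ((k : Nat) : Int) - 1 := by push_cast; ring
        rw [this, ih k (by omega) (by omega) (by omega), hseg]
        simp [List.dropWhile_cons, hsp]
      · rw [pvBSkipR, if_neg]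
        · rw [hseg]
          have hlen : ((s.take k).drop c).length = k - c := by
            simp; omega
          simp [List.dropWhile_cons, hsp, hlen]
          omega
        · rintro ⟨_, hc2⟩
          rw [hget] at hc2
          exact hsp (Option.some.injEq _ _ ▸ hc2)

-- the trimmed-string bracket test, expressed on both sides over the trimmed list r
lemma pv_bracket_check (r : List Char) (h4 : 4 ≤ r.length) :
    (PySem.Chars.startswith r ['\\', '('] && PySem.Chars.endswith r ['\\', ')'])
      = (decide (3 ≤ (r.length : Int) - 1) && (r[0]? == some '\\') && (r[1]? == some '(')
          && (r[r.length - 2]? == some '\\') && (r[r.length - 1]? == some ')')) := by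
  rcases r with _ | ⟨a, _ | ⟨b, u⟩⟩
  · simp at h4
  · simp at h4
  · rcases u.eq_nil_or_concat with rfl | ⟨v, x, rfl⟩
    · simp at h4
    · rcases v.eq_nil_or_concat with rfl | ⟨w, y, rfl⟩
      · simp at h4
      · simp only [List.concat_eq_append] at h4 ⊢
        have hlen : (a :: b :: ((w ++ [y]) ++ [x])).length = w.length + 4 := by
          simp
        have hgy : (a :: b :: ((w ++ [y]) ++ [x]))[w.length + 2]? = some y := by
          rw [show w.length + 2 = w.length + 1 + 1 by omega]
          simp only [List.getElem?_cons_succ]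
          rw [List.getElem?_append_left (by simp),
            List.getElem?_append_right (le_refl _)]
          simp
        have hgx : (a :: b :: ((w ++ [y]) ++ [x]))[w.length + 3]? = some x := by
          rw [show w.length + 3 = w.length + 1 + 1 + 1 by omega]
          simp only [List.getElem?_cons_succ]
          rw [List.getElem?_append_right (by simp)]
          simp
        have hdec : (3 : Int) ≤ ((w.length + 4 : Nat) : Int) - 1 := by push_cast; omega
        have hsuf : (['\\', ')'] <:+ a :: b :: ((w ++ [y]) ++ [x])) ↔ ('\\' = y ∧ ')' = x) := by
          rw [← List.reverse_prefix]
          simp [List.cons_prefix_cons]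
          exact and_comm
        rw [Bool.eq_iff_iff]
        simp only [Bool.and_eq_true, PySem.Chars.startswith_iff, PySem.Chars.endswith_iff,
          hlen, show w.length + 4 - 2 = w.length + 2 by omega,
          show w.length + 4 - 1 = w.length + 3 by omega, hgy, hgx, hsuf,
          List.cons_prefix_cons, List.nil_prefix, and_true, beq_iff_eq,
          decide_eq_true_eq, List.getElem?_cons_zero, List.getElem?_cons_succ,
          Option.some.injEq]
        constructor
        · rintro ⟨⟨ha, hb⟩, hy, hx⟩
          exact ⟨⟨⟨⟨hdec, ha.symm⟩, hb.symm⟩, hy.symm⟩, hx.symm⟩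
        · rintro ⟨⟨⟨⟨-, ha⟩, hb⟩, hy⟩, hx⟩
          exact ⟨⟨ha.symm, hb.symm⟩, hy.symm, hx.symm⟩

lemma pv_bracket_absurd (r : List Char) (h3 : r.length ≤ 3) :
    (PySem.Chars.startswith r ['\\', '('] && PySem.Chars.endswith r ['\\', ')']) = false := by
  rw [Bool.eq_false_iff]
  intro hb
  rw [Bool.and_eq_true, PySem.Chars.startswith_iff, PySem.Chars.endswith_iff] at hb
  obtain ⟨hp, hq⟩ := hb
  rcases hp with ⟨u, hu⟩
  rw [← hu] at hq h3
  rw [← List.reverse_prefix] at hq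
  rcases u with _ | ⟨z, _ | ⟨w, u⟩⟩
  · simp [List.cons_prefix_cons] at hq
  · simp [List.cons_prefix_cons] at hq
  · simp at h3; omega

-- ===== VERDICT (by name: the statement is the Claim_ definition above) =====
set_option maxHeartbeats 1000000 in
theorem inBrackets_spec : Claim_equal_inBrackets := by
  intro strx _
  unfold Spec_inBrackets inBrackets inBrackets_alt
  dsimp only
  have hif : ∀ b : Bool, (if b = true then true else false) = b := by
    intro b; cases b <;> simp
  set s := strx.toList with hs
  set W : Char → Bool := fun c => c == ' ' with hW
  set c : Nat := (s.takeWhile W).length with hc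
  have hcle : c ≤ s.length := by
    rw [hc]; exact (List.takeWhile_sublist (p := W) (l := s)).length_le
  have hskipL : pvBSkipL s 0 ((s.length : Int) - 1) = (c : Int) := by
    have h := pvBSkipL_spec s s.length 0 (by omega)
    simpa using h
  set t := s.drop c with htdef
  have ht : t = s.dropWhile W := by
    rw [htdef, hc, List.takeWhile_eq_take_findIdx_not, List.dropWhile_eq_drop_findIdx_not,
      List.length_take]
    rw [min_eq_left (List.findIdx_le_length (p := fun a => !W a) (xs := s))]
  set r : List Char := (t.reverse.dropWhile W).reverse with hrdef
  set L : Nat := r.length with hL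
  have hLt : (t.reverse.dropWhile W).length = L := by rw [hL, hrdef]; simp
  have hskipR : pvBSkipR s (c : Int) ((s.length : Int) - 1) = (c : Int) + (L : Int) - 1 := by
    have h := pvBSkipR_spec s c s.length s.length hcle (le_refl _) (by omega)
    rw [List.take_length] at h
    rw [h, ← htdef, hLt]
  have hA : pvAStripR (pvAStripL s) = r := by
    rw [pvAStripL_eq, pvAStripR_eq, hrdef, ht]
  rw [hskipL, hskipR, hA]
  have hja : ((c : Int) + (L : Int) - 1) - (c : Int) = (L : Int) - 1 := by ring
  rw [hja]
  by_cases h4 : 4 ≤ L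
  · -- trimmed length ≥ 4: compare character by character
    have hpr : r <+: t := by
      have h := List.reverse_prefix.mpr (List.dropWhile_suffix (l := t.reverse) (p := W))
      rw [← hrdef] at h
      simpa using h
    have hrt : r = t.take L := by
      rw [hL]; exact List.prefix_iff_eq_take.mp hpr
    have hget : ∀ k : Nat, k < L → PySem.List.pyGet? s ((c : Int) + (k : Int)) = r[k]? := by
      intro k hk
      rw [show ((c : Int) + (k : Int)) = ((c + k : Nat) : Int) by push_cast; ring,
        PySem.List.pyGet?_natCast]
      rw [hrt, List.getElem?_take_of_lt hk, htdef, List.getElem?_drop]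
    have hg0 : PySem.List.pyGet? s (c : Int) = r[0]? := by
      have h := hget 0 (by omega); simpa using h
    have hg1 : PySem.List.pyGet? s ((c : Int) + 1) = r[1]? := by
      have h := hget 1 (by omega); simpa using h
    have hg2 : PySem.List.pyGet? s ((c : Int) + (L : Int) - 1 - 1) = r[L - 2]? := by
      have h := hget (L - 2) (by omega)
      rw [← h]; congr 1; omega
    have hg3 : PySem.List.pyGet? s ((c : Int) + (L : Int) - 1) = r[L - 1]? := by
      have h := hget (L - 1) (by omega)
      rw [← h]; congr 1; omega
    rw [hg0, hg1, hg2, hg3]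
    rw [hif]
    rw [hL] at h4 ⊢
    exact pv_bracket_check r h4
  · -- trimmed length ≤ 3: both sides are false
    have hdec : decide (3 ≤ (L : Int) - 1) = false := by
      simp only [decide_eq_false_iff_not]; omega
    rw [hdec]
    simp only [Bool.false_and]
    rw [hif]
    exact pv_bracket_absurd r (by omega)
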